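-- pv_equiv track=rewrite | github.com/Dev-Soft-source/Flask-Article | script2/utils/prompt_utils.py | generate_example_outline
-- ===== SOURCE A (Python) =====
-- def generate_example_outline(sizesections, sizeheadings):
--     """
--     Generate an example outline structure based on the configuration.
--
--     Args:
--         sizesections (int): Number of main sections to include
--         sizeheadings (int): Number of subsections per main section
--
--     Returns:
--         str: A formatted example outline
--     """
--     roman_numerals = ["I", "II", "III", "IV", "V", "VI", "VII", "VIII", "IX", "X",
--                       "XI", "XII", "XIII", "XIV", "XV"]
--
--     # Limit to a reasonable number
--     sizesections = min(sizesections, len(roman_numerals))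
--     sizeheadings = min(sizeheadings, 15)
--
--     # Generate subsection letters (A through O)
--     subsection_letters = [chr(65 + i) for i in range(sizeheadings)]
--
--     outline = []
--
--     for i in range(sizesections):
--         # Add section header
--         outline.append(f"{roman_numerals[i]}. [Main Section Title]")
--
--         # Add subsections
--         for j in range(sizeheadings):
--             outline.append(f"{subsection_letters[j]}. [Subsection Point]")
--
--         # Add blank line between sections
--         if i < sizesections - 1:
--             outline.append("")
--
--     return "\n".join(outline)
-- ===== SOURCE B (Python) =====
-- ROMAN_NUMERALS = ["I", "II", "III", "IV", "V", "VI", "VII", "VIII", "IX", "X",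
--                   "XI", "XII", "XIII", "XIV", "XV"]
--
-- def generate_example_outline(sizesections, sizeheadings):
--     # Render the shared subsection tail ONCE (A re-renders it inside every section).
--     tail = ""
--     for j in range(min(sizeheadings, 15)):
--         tail += "\n" + chr(65 + j) + ". [Subsection Point]"
--     n = min(sizesections, len(ROMAN_NUMERALS))
--     # Build the outline by recursion on the section index, concatenating strings
--     # directly: no outline list, no join, no separator sentinel.
--     def build(i):
--         if i >= n:
--             return ""
--         block = ROMAN_NUMERALS[i] + ". [Main Section Title]" + tail
--         if i + 1 < n:
--             return block + "\n\n" + build(i + 1)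
--         return block
--     return build(0)
-- ===== Notes on version B (the rewrite author's own statement) =====
-- stated objective: alternative
-- what changed: B replaces A's list accumulator, per-section inner loop and conditional empty-string separator with direct string construction: the identical subsection tail is rendered once and shared by every section, and the outline is produced by a recursion over section indices that concatenates header+tail blocks with '\n\n', with no list and no join.
import Mathlib
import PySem

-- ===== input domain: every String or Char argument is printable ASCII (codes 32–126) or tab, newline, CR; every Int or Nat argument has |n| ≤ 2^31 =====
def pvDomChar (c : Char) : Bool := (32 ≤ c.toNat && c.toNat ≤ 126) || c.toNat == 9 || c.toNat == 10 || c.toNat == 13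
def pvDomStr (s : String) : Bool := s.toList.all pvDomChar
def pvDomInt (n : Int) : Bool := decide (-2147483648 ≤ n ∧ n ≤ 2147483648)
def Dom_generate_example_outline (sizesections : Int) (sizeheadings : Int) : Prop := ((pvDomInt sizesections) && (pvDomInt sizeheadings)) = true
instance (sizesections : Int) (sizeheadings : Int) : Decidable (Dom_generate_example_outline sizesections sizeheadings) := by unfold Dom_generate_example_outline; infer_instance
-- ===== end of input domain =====

-- B renders the shared subsection tail once and builds the outline by recursion over
-- section indices, concatenating strings directly — no outline list, no join, no
-- separator sentinel (objective: alternative construction of the same string).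

-- ===== PORT A =====
-- Literal port of A: one outline list grown by an outer fold over range(sizesections),
-- an inner fold over range(sizeheadings), and a conditional "" separator; joined with "\n".
-- roman_numerals[i] is ported as pyGetD with default "" — exact, since 0 ≤ i < 15 = length.
-- chr(65 + i) is ported as String.ofList [Char.ofNat (65 + i).toNat] — exact, since 0 ≤ i < 15.
def generate_example_outline (sizesections : Int) (sizeheadings : Int) : String :=
  let roman_numerals : List String :=
    ["I", "II", "III", "IV", "V", "VI", "VII", "VIII", "IX", "X",
     "XI", "XII", "XIII", "XIV", "XV"]
  let sizesections := min sizesections (roman_numerals.length : Int)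
  let sizeheadings := min sizeheadings 15
  let subsection_letters : List String :=
    (PySem.List.pyRange 0 sizeheadings 1).map
      (fun i => String.ofList [Char.ofNat (65 + i).toNat])
  let outline : List String :=
    (PySem.List.pyRange 0 sizesections 1).foldl (fun outline i =>
      let outline := outline ++ [PySem.List.pyGetD roman_numerals i "" ++ ". [Main Section Title]"]
      let outline := (PySem.List.pyRange 0 sizeheadings 1).foldl (fun outline j =>
        outline ++ [PySem.List.pyGetD subsection_letters j "" ++ ". [Subsection Point]"]) outline
      if i < sizesections - 1 then outline ++ [""] else outline) []
  PySem.Str.join "\n" outline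

-- ===== PORT B =====
-- Port of B: the shared tail is built once by a fold; `build` is the recursion over
-- section indices (structural on the remaining count (n - i).toNat).
def pvRomanNumerals : List String :=
  ["I", "II", "III", "IV", "V", "VI", "VII", "VIII", "IX", "X",
   "XI", "XII", "XIII", "XIV", "XV"]

def pvBuild (n : Int) (tail : String) (i : Int) : String :=
  if _h : n ≤ i then ""
  else
    let block := PySem.List.pyGetD pvRomanNumerals i "" ++ ". [Main Section Title]" ++ tail
    if i + 1 < n then block ++ "\n\n" ++ pvBuild n tail (i + 1) else block
termination_by (n - i).toNat
decreasing_by omega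

def generate_example_outline_alt (sizesections : Int) (sizeheadings : Int) : String :=
  let tail : String :=
    (PySem.List.pyRange 0 (min sizeheadings 15) 1).foldl
      (fun tail j => tail ++ "\n" ++ String.ofList [Char.ofNat (65 + j).toNat] ++ ". [Subsection Point]") ""
  let n := min sizesections (pvRomanNumerals.length : Int)
  pvBuild n tail 0

-- ===== PRECONDITION & SPEC =====
def Spec_generate_example_outline (sizesections : Int) (sizeheadings : Int) (out : String) : Prop := out = generate_example_outline_alt sizesections sizeheadings
instance (sizesections : Int) (sizeheadings : Int) (out : String) : Decidable (Spec_generate_example_outline sizesections sizeheadings out) := by unfold Spec_generate_example_outline; infer_instance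

-- ===== CLAIM (what is proved, stated in full; the proofs are below) =====
def Claim_equal_generate_example_outline : Prop := ∀ (sizesections : Int) (sizeheadings : Int), Dom_generate_example_outline sizesections sizeheadings → Spec_generate_example_outline sizesections sizeheadings (generate_example_outline sizesections sizeheadings)

-- ===== LEMMAS AND PROOFS =====

-- The common section contents: header line and subsection lines of section i.
def pvHdr (i : Int) : String :=
  PySem.List.pyGetD pvRomanNumerals i "" ++ ". [Main Section Title]"
def pvSub (j : Int) : String :=
  String.ofList [Char.ofNat (65 + j).toNat] ++ ". [Subsection Point]"
def pvSec (m i : Int) : List String := pvHdr i :: (PySem.List.pyRange 0 m 1).map pvSub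

-- String-level join facts.
theorem pvJoinNil (sep : String) : PySem.Str.join sep [] = "" := by
  simp [PySem.Str.join, PySem.Chars.join_nil]

theorem pvJoinSingleton (sep a : String) : PySem.Str.join sep [a] = a := by
  simp [PySem.Str.join, PySem.Chars.join_singleton]

theorem pvConsNe (sep a : String) (l : List String) (hl : l ≠ []) :
    PySem.Str.join sep (a :: l) = a ++ sep ++ PySem.Str.join sep l := by
  cases l with
  | nil => exact absurd rfl hl
  | cons b l =>
    simp [PySem.Str.join, PySem.Chars.join_cons_cons, String.append_assoc]

theorem pvMerge (sep a b : String) (l : List String) :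
    PySem.Str.join sep (a :: b :: l) = PySem.Str.join sep ((a ++ sep ++ b) :: l) := by
  cases l with
  | nil =>
    simp [PySem.Str.join, PySem.Chars.join_cons_cons, PySem.Chars.join_singleton]
  | cons c l =>
    simp [PySem.Str.join, PySem.Chars.join_cons_cons, List.append_assoc]

-- B's tail fold is a "\n"-join with seed a.
theorem pvFold_join (L : List Int) : ∀ a : String,
    L.foldl (fun tail j => tail ++ "\n" ++ String.ofList [Char.ofNat (65 + j).toNat] ++ ". [Subsection Point]") a
      = PySem.Str.join "\n" (a :: L.map pvSub) := by
  induction L with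
  | nil => intro a; rw [List.foldl_nil, List.map_nil, pvJoinSingleton]
  | cons x L ih =>
    intro a
    rw [List.foldl_cons, ih, List.map_cons, pvMerge]
    have : a ++ "\n" ++ String.ofList [Char.ofNat (65 + x).toNat] ++ ". [Subsection Point]"
        = a ++ "\n" ++ pvSub x := by
      simp [pvSub, String.append_assoc]
    rw [this]

-- Prepending a header to the tail join gives the join of the full section.
theorem pvHdrTail (hdr : String) (subs : List String) :
    hdr ++ PySem.Str.join "\n" ("" :: subs) = PySem.Str.join "\n" (hdr :: subs) := by
  cases subs with
  | nil => rw [pvJoinSingleton, pvJoinSingleton]; simp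
  | cons x l =>
    rw [pvConsNe "\n" "" (x :: l) (by simp), pvConsNe "\n" hdr (x :: l) (by simp)]
    simp [String.append_assoc]

-- Characterisation of pvBuild as a "\n\n"-join of blocks over range(i, n).
theorem pvBuild_eq (n : Int) (tail : String) : ∀ (k : Nat) (i : Int), n - i ≤ (k : Int) →
    pvBuild n tail i
      = PySem.Str.join "\n\n" ((PySem.List.pyRange i n 1).map (fun j => pvHdr j ++ tail)) := by
  intro k
  induction k with
  | zero =>
    intro i hi
    have hni : n ≤ i := by omega
    rw [pvBuild, dif_pos hni, PySem.List.pyRange_one_eq_nil hni, List.map_nil, pvJoinNil]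
  | succ k ih =>
    intro i hi
    rw [pvBuild]
    by_cases hni : n ≤ i
    · rw [dif_pos hni, PySem.List.pyRange_one_eq_nil hni, List.map_nil, pvJoinNil]
    · rw [dif_neg hni]
      have hlt : i < n := by omega
      rw [PySem.List.pyRange_one_cons hlt, List.map_cons]
      by_cases h2 : i + 1 < n
      · rw [if_pos h2, ih (i + 1) (by omega),
            pvConsNe _ _ _ (by rw [PySem.List.pyRange_one_cons h2]; simp)]
        simp [pvHdr]
      · rw [if_neg h2]
        have : n ≤ i + 1 := by omega
        rw [PySem.List.pyRange_one_eq_nil this, List.map_nil, pvJoinSingleton]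
        simp [pvHdr]

-- join distributes over an append of two nonempty part lists.
theorem pvJoinAppend (sep : List Char) :
    ∀ (p q : List (List Char)), p ≠ [] → q ≠ [] →
      PySem.Chars.join sep (p ++ q)
        = PySem.Chars.join sep p ++ sep ++ PySem.Chars.join sep q := by
  intro p
  induction p with
  | nil => intro q hp _; exact absurd rfl hp
  | cons x xs ih =>
    intro q _ hq
    cases xs with
    | nil =>
      cases q with
      | nil => exact absurd rfl hq
      | cons y ys =>
        simp [PySem.Chars.join_cons_cons, PySem.Chars.join_singleton]
    | cons x' xs' =>
      have := ih q (by simp) hq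
      simp only [List.cons_append] at *
      rw [PySem.Chars.join_cons_cons, PySem.Chars.join_cons_cons, this]
      simp [List.append_assoc]

-- Key shape lemma: a "\n"-join with a "" element between consecutive sections
-- equals the "\n\n"-join of the per-section joins.
theorem pvJoinKey (sep : List Char) (g : Int → List (List Char)) (hg : ∀ i, g i ≠ []) :
    ∀ k : Nat,
      PySem.Chars.join sep
          (((PySem.List.pyRange 0 (k : Int) 1).flatMap (fun i => g i ++ [[]])) ++ g (k : Int))
        = PySem.Chars.join (sep ++ sep)
          ((PySem.List.pyRange 0 ((k : Int) + 1) 1).map (fun i => PySem.Chars.join sep (g i))) := by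
  intro k
  induction k with
  | zero =>
    simp only [Nat.cast_zero]
    rw [PySem.List.pyRange_one_eq_nil (by omega : (0:Int) ≤ 0),
        PySem.List.pyRange_one_singleton]
    simp [PySem.Chars.join_singleton]
  | succ k ih =>
    have h1 : PySem.List.pyRange 0 ((k : Int) + 1) 1
        = PySem.List.pyRange 0 (k : Int) 1 ++ [(k : Int)] :=
      PySem.List.pyRange_one_succ_right (by omega)
    have h2 : PySem.List.pyRange 0 (((k : Nat) + 1 : Int)) 1 ++ [((k : Nat) + 1 : Int)]
        = PySem.List.pyRange 0 (((k : Nat) + 1 : Int) + 1) 1 :=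
      (PySem.List.pyRange_one_succ_right (by omega)).symm
    obtain ⟨q, rest, hq⟩ : ∃ q rest, g ((k : Int) + 1) = q :: rest := by
      cases hgk : g ((k : Int) + 1) with
      | nil => exact absurd hgk (hg _)
      | cons q rest => exact ⟨q, rest, rfl⟩
    have hPne : ((PySem.List.pyRange 0 (k : Int) 1).flatMap (fun i => g i ++ [[]])) ++ g (k : Int) ≠ [] := by
      cases hgk : g (k : Int) with
      | nil => exact absurd hgk (hg _)
      | cons a b => simp
    have hMapne : ((PySem.List.pyRange 0 ((k : Int) + 1) 1).map (fun i => PySem.Chars.join sep (g i))) ≠ [] := by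
      rw [h1]; simp
    push_cast
    rw [h1]
    rw [List.flatMap_append]
    have hsingle : ([(k : Int)] : List Int).flatMap (fun i => g i ++ [[]]) = g (k : Int) ++ [[]] := by
      simp
    rw [hsingle]
    have hassoc :
        ((PySem.List.pyRange 0 (k : Int) 1).flatMap (fun i => g i ++ [[]]) ++ (g (k : Int) ++ [[]])) ++ g ((k : Int) + 1)
          = (((PySem.List.pyRange 0 (k : Int) 1).flatMap (fun i => g i ++ [[]])) ++ g (k : Int)) ++ ([] :: g ((k : Int) + 1)) := by
      simp [List.append_assoc]
    rw [hassoc]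
    rw [pvJoinAppend sep _ _ hPne (by simp)]
    rw [ih]
    have hjq : PySem.Chars.join sep ([] :: g ((k : Int) + 1))
        = sep ++ PySem.Chars.join sep (g ((k : Int) + 1)) := by
      rw [hq, PySem.Chars.join_cons_cons]; simp
    rw [hjq]
    rw [← h2, List.map_append, pvJoinAppend (sep ++ sep) _ _ hMapne (by simp)]
    simp [List.append_assoc]

-- A's outline list is a flatMap of section contents plus conditional "" separators.
theorem pvA_char (s h : Int) :
    generate_example_outline s h
      = PySem.Str.join "\n"
          ((PySem.List.pyRange 0 (min s 15) 1).flatMap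
            (fun i => pvSec (min h 15) i ++ if i < min s 15 - 1 then [""] else [])) := by
  unfold generate_example_outline
  simp only [List.length_cons, List.length_nil, Nat.reduceAdd, Nat.cast_ofNat]
  congr 1
  have hfold := PySem.List.foldl_append_eq_flatMap
    (fun i => pvSec (min h 15) i ++ if i < min s 15 - 1 then [""] else [])
    (PySem.List.pyRange 0 (min s 15) 1) []
  simp only [List.nil_append] at hfold
  rw [← hfold]
  apply PySem.List.foldl_congr_mem
  intro acc i _
  rw [PySem.List.foldl_append_singleton_eq_map]
  have hsub : (PySem.List.pyRange 0 (min h 15) 1).map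
      (fun j => PySem.List.pyGetD ((PySem.List.pyRange 0 (min h 15) 1).map
        (fun i => String.ofList [Char.ofNat (65 + i).toNat])) j "" ++ ". [Subsection Point]")
      = (PySem.List.pyRange 0 (min h 15) 1).map pvSub := by
    apply List.map_congr_left
    intro j hj
    have hj' := (PySem.List.mem_pyRange_one).mp hj
    rw [PySem.List.pyGetD_map_pyRange_of_nonneg _ _ _ _ hj'.1 hj'.2]
    rfl
  rw [hsub]
  split_ifs with hc <;> simp [pvSec, pvHdr, pvRomanNumerals, List.append_assoc]

-- B's result is the "\n\n"-join of per-section "\n"-joins.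
theorem pvB_char (s h : Int) :
    generate_example_outline_alt s h
      = PySem.Str.join "\n\n"
          ((PySem.List.pyRange 0 (min s 15) 1).map
            (fun i => PySem.Str.join "\n" (pvSec (min h 15) i))) := by
  unfold generate_example_outline_alt
  have hlen : (pvRomanNumerals.length : Int) = 15 := by decide
  rw [hlen]
  rw [pvBuild_eq (min s 15) _ (min s 15).toNat 0 (by omega)]
  apply congrArg
  apply List.map_congr_left
  intro i _
  rw [pvFold_join _ "", pvHdrTail]
  rfl

-- Both ports produce "" when sizesections ≤ 0 (both section ranges are empty).
theorem pvA_nonpos (s h : Int) (hs : s ≤ 0) : generate_example_outline s h = "" := by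
  have : min s (15 : Int) ≤ 0 := by omega
  rw [pvA_char]
  simp [PySem.List.pyRange_one_eq_nil this, PySem.Str.join, PySem.Chars.join_nil]

theorem pvB_nonpos (s h : Int) (hs : s ≤ 0) : generate_example_outline_alt s h = "" := by
  have : min s (15 : Int) ≤ 0 := by omega
  rw [pvB_char]
  simp [PySem.List.pyRange_one_eq_nil this, PySem.Str.join, PySem.Chars.join_nil]

-- ===== VERDICT (by name: the statement is the Claim_ definition above) =====
theorem generate_example_outline_spec : Claim_equal_generate_example_outline := by
  intro s h _
  unfold Spec_generate_example_outline
  rcases (by omega : s ≤ 0 ∨ 0 < s) with hs | hs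
  · rw [pvA_nonpos s h hs, pvB_nonpos s h hs]
  · rw [pvA_char, pvB_char]
    set n : Int := min s 15 with hn
    set m : Int := min h 15 with hm
    have hk : ∃ k : Nat, n = (k : Int) + 1 := ⟨(n - 1).toNat, by omega⟩
    obtain ⟨k, hk⟩ := hk
    unfold PySem.Str.join
    congr 1
    have hnl : ("\n\n" : String).toList = ("\n" : String).toList ++ ("\n" : String).toList := by decide
    rw [hnl]
    have hcond : ((PySem.List.pyRange 0 n 1).flatMap
          (fun i => pvSec m i ++ if i < n - 1 then [""] else []))
        = ((PySem.List.pyRange 0 ((k : Int)) 1).flatMap (fun i => pvSec m i ++ [""])) ++ pvSec m (k : Int) := by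
      rw [hk]
      rw [PySem.List.pyRange_one_succ_right (by omega : (0:Int) ≤ (k : Int))]
      rw [List.flatMap_append]
      have h1 : ((PySem.List.pyRange 0 (k : Int) 1).flatMap
            (fun i => pvSec m i ++ if i < (k : Int) + 1 - 1 then [""] else []))
          = (PySem.List.pyRange 0 (k : Int) 1).flatMap (fun i => pvSec m i ++ [""]) := by
        apply List.flatMap_congr
        intro i hi
        have := (PySem.List.mem_pyRange_one).mp hi
        rw [if_pos (by omega)]
      have h2 : ([(k : Int)] : List Int).flatMap
            (fun i => pvSec m i ++ if i < (k : Int) + 1 - 1 then [""] else []) = pvSec m (k : Int) := by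
        simp
      rw [h1, h2]
    rw [hcond]
    rw [List.map_append, List.map_flatMap]
    have hflat : (PySem.List.pyRange 0 (k : Int) 1).flatMap
          (fun i => List.map String.toList (pvSec m i ++ [""]))
        = (PySem.List.pyRange 0 (k : Int) 1).flatMap
          (fun i => (pvSec m i).map String.toList ++ [[]]) := by
      apply List.flatMap_congr
      intro i _
      simp
    rw [hflat]
    have hkey := pvJoinKey ("\n" : String).toList
      (fun i => (pvSec m i).map String.toList) (fun i => by simp [pvSec]) k
    rw [hkey, hk]
    rw [List.map_map]
    apply congrArg
    apply List.map_congr_left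
    intro i _
    simp [Function.comp]
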